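-- pv_equiv track=rewrite | github.com/SightVanish/MyLeetcode | task2101.py | maximumDetonation
-- ===== SOURCE A (Python) =====
-- from typing import List
--
-- def maximumDetonation(bombs: List[List[int]]) -> int:
--     # build graph
--     graph = {}
--     for i in range(len(bombs)):
--         graph[i] = []
--         for j in range(len(bombs)):
--             if i == j: continue
--             if (bombs[i][0] - bombs[j][0])**2 + (bombs[i][1] - bombs[j][1])**2 <= bombs[i][2]**2:
--                 graph[i] += [j]
--     # run dfs on each nodes
--     def dfs(i):
--         d, visited = [i], []
--         while d:
--             i = d[0]
--             d = d[1:]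
--             visited += [i]
--             for j in graph[i]:
--                 if j not in visited and j not in d:
--                     d.append(j)
--         return len(visited)
--     res = 0
--     for i in range(len(graph)):
--         res = max(res, dfs(i))
--     return res
-- ===== SOURCE B (Python) =====
-- from typing import List
--
-- def maximumDetonation(bombs: List[List[int]]) -> int:
--     n = len(bombs)
--     adj = [[j for j in range(n)
--             if j != i and (bombs[i][0] - bombs[j][0]) ** 2
--                           + (bombs[i][1] - bombs[j][1]) ** 2 <= bombs[i][2] ** 2]
--            for i in range(n)]
--
--     def dfs(src):
--         visited = {src}
--         stack = [src]
--         while stack: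
--             u = stack.pop()
--             for v in adj[u]:
--                 if v not in visited:
--                     visited.add(v)
--                     stack.append(v)
--         return len(visited)
--
--     return max((dfs(i) for i in range(n)), default=0)
-- ===== Notes on version B (the rewrite author's own statement) =====
-- stated objective: faster
-- what changed: Replaced A's per-source queue BFS with O(n)-list membership scans on both the visited list and the pending queue by a per-source stack DFS that marks nodes in a hash set at push time, and the dict-of-lists graph by a plain adjacency list built with comprehensions; the result maximum is taken with max(..., default=0).
import Mathlib
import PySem

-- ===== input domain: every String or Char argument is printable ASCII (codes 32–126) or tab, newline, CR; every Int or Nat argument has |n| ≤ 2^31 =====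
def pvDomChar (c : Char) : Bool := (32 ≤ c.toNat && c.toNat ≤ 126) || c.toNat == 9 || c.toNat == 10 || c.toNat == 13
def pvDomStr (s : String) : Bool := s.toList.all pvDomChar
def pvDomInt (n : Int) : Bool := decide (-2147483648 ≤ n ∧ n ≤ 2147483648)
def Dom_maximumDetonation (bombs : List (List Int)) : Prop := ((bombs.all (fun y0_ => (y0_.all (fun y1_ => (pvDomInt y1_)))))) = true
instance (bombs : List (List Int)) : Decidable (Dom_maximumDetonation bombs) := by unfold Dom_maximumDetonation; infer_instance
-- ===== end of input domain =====

-- B replaces A's queue BFS with list-membership scans by a stack DFS marking nodes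
-- in a set at push time over a plain adjacency list (objective: faster).

-- ===== PORT A =====
-- the detonation-range test (bombs[i][0]-bombs[j][0])**2 + (bombs[i][1]-bombs[j][1])**2 <= bombs[i][2]**2
-- (row/coordinate accesses are in range on Pre_, so List.getD is exact there)
def pvA_hit (bombs : List (List Int)) (i j : Nat) : Bool :=
  decide (((bombs.getD i []).getD 0 0 - (bombs.getD j []).getD 0 0) ^ 2
      + ((bombs.getD i []).getD 1 0 - (bombs.getD j []).getD 1 0) ^ 2
      ≤ ((bombs.getD i []).getD 2 0) ^ 2)

-- inner loop of the graph build: graph[i] = []; for j: ... graph[i] += [j]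
def pvA_row (bombs : List (List Int)) (i : Nat) : List Nat :=
  (List.range bombs.length).foldl
    (fun acc j => if i == j then acc
      else if pvA_hit bombs i j then acc ++ [j] else acc) []

def pvA_graph (bombs : List (List Int)) : PySem.Dict Nat (List Nat) :=
  (List.range bombs.length).foldl (fun g i => g.insert i (pvA_row bombs i)) PySem.Dict.empty

-- A's dfs: while d: i = d[0]; d = d[1:]; visited += [i]; for j in graph[i]: if j not in visited and j not in d: d.append(j)
-- fuel = len(bombs) iterations always suffice (each iteration moves one fresh node into visited)
def pvA_dfs (graph : PySem.Dict Nat (List Nat)) : Nat → List Nat → List Nat → List Nat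
  | 0, _, visited => visited
  | _ + 1, [], visited => visited
  | fuel + 1, i :: rest, visited =>
    let visited' := visited ++ [i]
    let d' := (graph.getD i []).foldl
      (fun acc j => if !visited'.contains j && !acc.contains j then acc ++ [j] else acc) rest
    pvA_dfs graph fuel d' visited'

def maximumDetonation (bombs : List (List Int)) : Int :=
  let graph := pvA_graph bombs
  (List.range bombs.length).foldl
    (fun res i => max res ((pvA_dfs graph bombs.length [i] []).length : Int)) 0

-- ===== PORT B =====
def pvB_hit (bombs : List (List Int)) (i j : Nat) : Bool :=
  decide (((bombs.getD i []).getD 0 0 - (bombs.getD j []).getD 0 0) ^ 2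
      + ((bombs.getD i []).getD 1 0 - (bombs.getD j []).getD 1 0) ^ 2
      ≤ ((bombs.getD i []).getD 2 0) ^ 2)

-- adj = [[j for j in range(n) if j != i and ...] for i in range(n)]
def pvB_adj (bombs : List (List Int)) : List (List Nat) :=
  (List.range bombs.length).map (fun i =>
    (List.range bombs.length).filter (fun j => !(j == i) && pvB_hit bombs i j))

-- B's dfs: stack with pop() at the top (represented head-first), visited marked at push time.
-- fuel = len(bombs) iterations always suffice (each node is pushed at most once)
def pvB_dfs (adj : List (List Nat)) : Nat → List Nat → PySem.Set Nat → PySem.Set Nat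
  | 0, _, visited => visited
  | _ + 1, [], visited => visited
  | fuel + 1, u :: rest, visited =>
    let s := (adj.getD u []).foldl
      (fun (p : List Nat × PySem.Set Nat) v =>
        if PySem.Set.contains p.2 v then p else (v :: p.1, PySem.Set.add p.2 v)) (rest, visited)
    pvB_dfs adj fuel s.1 s.2

def maximumDetonation_alt (bombs : List (List Int)) : Int :=
  let adj := pvB_adj bombs
  let counts := (List.range bombs.length).map
    (fun i => ((pvB_dfs adj bombs.length [i] (PySem.Set.ofList [i])).length : Int))
  (PySem.List.max? counts (fun x => x)).getD 0

-- ===== PRECONDITION & SPEC =====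
-- Pre_ excludes exactly the inputs on which Python A raises IndexError: with at least two bombs,
-- every pair i ≠ j is tested and the test reads bombs[i][0], bombs[i][1], bombs[i][2],
-- so A raises iff some row is shorter than 3 (with ≤ 1 bomb nothing is ever indexed).
def Pre_maximumDetonation (bombs : List (List Int)) : Prop :=
  bombs.length ≤ 1 ∨ ∀ b ∈ bombs, 3 ≤ b.length
instance (bombs : List (List Int)) : Decidable (Pre_maximumDetonation bombs) := by
  unfold Pre_maximumDetonation; infer_instance

def pvWitness_maximumDetonation : List (List Int) := [[0, 0, 1], [1, 0, 3]]

def Spec_maximumDetonation (bombs : List (List Int)) (out : Int) : Prop := out = maximumDetonation_alt bombs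
instance (bombs : List (List Int)) (out : Int) : Decidable (Spec_maximumDetonation bombs out) := by
  unfold Spec_maximumDetonation; infer_instance

-- ===== CLAIM (what is proved, stated in full; the proofs are below) =====
def Claim_equal_maximumDetonation : Prop := ∀ (bombs : List (List Int)), Dom_maximumDetonation bombs → Pre_maximumDetonation bombs → Spec_maximumDetonation bombs (maximumDetonation bombs)

-- ===== LEMMAS AND PROOFS =====

-- the common neighbour function and reachability
def pvNbr (bombs : List (List Int)) (u : Nat) : List Nat :=
  (List.range bombs.length).filter (fun j => !(j == u) && pvA_hit bombs u j)

def pvReach (bombs : List (List Int)) : Nat → Nat → Prop :=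
  Relation.ReflTransGen (fun u v => v ∈ pvNbr bombs u)

lemma pvNbr_lt (bombs : List (List Int)) (u v : Nat) (h : v ∈ pvNbr bombs u) :
    v < bombs.length := by
  unfold pvNbr at h
  simpa using (List.mem_range.mp (List.mem_of_mem_filter h))

lemma pvA_row_eq (bombs : List (List Int)) (i : Nat) :
    pvA_row bombs i = pvNbr bombs i := by
  unfold pvA_row pvNbr
  have key : ∀ (l : List Nat) (acc : List Nat),
      l.foldl (fun acc j => if i == j then acc
        else if pvA_hit bombs i j then acc ++ [j] else acc) acc
        = acc ++ l.filter (fun j => !(j == i) && pvA_hit bombs i j) := by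
    intro l
    induction l with
    | nil => intro acc; simp
    | cons j t ih =>
      intro acc
      simp only [List.foldl_cons, List.filter_cons]
      by_cases hij : i = j
      · subst hij
        rw [if_pos (by simp)]
        simp only [BEq.rfl, Bool.not_true, Bool.false_and, Bool.false_eq_true, if_false]
        exact ih acc
      · rw [if_neg (by simpa using hij)]
        by_cases hh : pvA_hit bombs i j = true
        · rw [if_pos hh]
          have : (!(j == i) && pvA_hit bombs i j) = true := by
            simp [hh, Ne.symm hij]
          rw [this, ih]
          simp
        · rw [if_neg hh]
          have hfalse : (!(j == i) && pvA_hit bombs i j) = false := by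
            simp [hh]
          rw [hfalse, ih]
          simp
  rw [key]
  simp

lemma pvA_graph_getD (bombs : List (List Int)) (u : Nat) :
    (pvA_graph bombs).getD u [] =
      if u < bombs.length then pvNbr bombs u else [] := by
  unfold pvA_graph
  have key : ∀ (m : Nat) (d : PySem.Dict Nat (List Nat)),
      ((List.range m).foldl (fun g i => g.insert i (pvA_row bombs i)) d).getD u [] =
        if u < m then pvA_row bombs u else d.getD u [] := by
    intro m
    induction m with
    | zero => intro d; simp
    | succ m ih =>
      intro d
      rw [List.range_succ, List.foldl_append]
      simp only [List.foldl_cons, List.foldl_nil]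
      rw [PySem.Dict.getD_insert]
      by_cases h : u = m
      · simp [h]
      · rw [if_neg h, ih]
        by_cases h2 : u < m
        · simp [h2, Nat.lt_succ_of_lt h2]
        · have h3 : ¬ u < m + 1 := by omega
          simp [h2, h3]
  rw [key]
  by_cases h : u < bombs.length <;> simp [h, pvA_row_eq]

lemma pvB_adj_getD (bombs : List (List Int)) (u : Nat) :
    (pvB_adj bombs).getD u [] =
      if u < bombs.length then pvNbr bombs u else [] := by
  unfold pvB_adj pvNbr
  have hhit : pvB_hit = pvA_hit := rfl
  by_cases h : u < bombs.length
  · rw [List.getD_eq_getElem?_getD, List.getElem?_map, List.getElem?_range h]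
    simp [h, hhit]
  · have h2 : bombs.length ≤ u := by omega
    rw [List.getD_eq_getElem?_getD, List.getElem?_eq_none (by simpa using h2)]
    simp [h]

-- a nodup list of naturals below n has at most n elements
lemma pvNodup_length_le (l : List Nat) (n : Nat) (hnd : l.Nodup)
    (hlt : ∀ x ∈ l, x < n) : l.length ≤ n := by
  have h1 : l.toFinset ⊆ Finset.range n := by
    intro x hx
    simp only [Finset.mem_range]
    exact hlt x (List.mem_toFinset.mp hx)
  have h2 := Finset.card_le_card h1
  rwa [List.toFinset_card_of_nodup hnd, Finset.card_range] at h2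

-- membership in A's inner queue-extension fold
lemma pvA_fold_mem (vis l : List Nat) (acc : List Nat) (x : Nat) :
    (x ∈ l.foldl (fun acc j => if !vis.contains j && !acc.contains j then acc ++ [j] else acc) acc)
      ↔ x ∈ acc ∨ (x ∈ l ∧ x ∉ vis) := by
  induction l generalizing acc with
  | nil => simp
  | cons j t ih =>
    simp only [List.foldl_cons]
    by_cases hv : j ∈ vis
    · rw [if_neg (by simp [hv]), ih]
      rcases eq_or_ne x j with rfl | hne
      · simp [hv]
      · simp [List.mem_cons, hne]
    · by_cases ha : j ∈ acc
      · rw [if_neg (by simp [ha]), ih]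
        rcases eq_or_ne x j with rfl | hne
        · simp [ha, hv]
        · simp [List.mem_cons, hne]
      · rw [if_pos (by simp [hv, ha]), ih]
        rcases eq_or_ne x j with rfl | hne
        · simp [hv, ha]
        · simp [List.mem_cons, List.mem_append, hne]

-- A's inner fold keeps (visited ++ queue) duplicate-free
lemma pvA_fold_nodup (vis l : List Nat) (acc : List Nat)
    (h : (vis ++ acc).Nodup) :
    (vis ++ l.foldl (fun acc j => if !vis.contains j && !acc.contains j then acc ++ [j] else acc) acc).Nodup := by
  induction l generalizing acc with
  | nil => simpa
  | cons j t ih =>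
    simp only [List.foldl_cons]
    by_cases hv : j ∈ vis
    · rw [if_neg (by simp [hv])]; exact ih acc h
    · by_cases ha : j ∈ acc
      · rw [if_neg (by simp [ha])]; exact ih acc h
      · rw [if_pos (by simp [hv, ha])]
        apply ih
        have heq : vis ++ (acc ++ [j]) = (vis ++ acc) ++ [j] := by simp
        rw [heq]
        apply List.Nodup.append h (List.nodup_singleton j)
        intro a hamem hj
        simp only [List.mem_singleton] at hj
        subst hj
        rcases List.mem_append.mp hamem with h1 | h1
        · exact hv h1
        · exact ha h1

-- main invariant lemma for A's worklist loop
lemma pvA_dfs_spec (bombs : List (List Int)) :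
    ∀ (fuel : Nat) (d visited : List Nat),
    (visited ++ d).Nodup →
    (∀ x ∈ visited ++ d, x < bombs.length) →
    (∀ u ∈ visited, ∀ v ∈ pvNbr bombs u, v ∈ visited ∨ v ∈ d) →
    bombs.length ≤ fuel + visited.length →
    (pvA_dfs (pvA_graph bombs) fuel d visited).Nodup ∧
    (∀ x ∈ visited ++ d, x ∈ pvA_dfs (pvA_graph bombs) fuel d visited) ∧
    (∀ x ∈ pvA_dfs (pvA_graph bombs) fuel d visited,
        x ∈ visited ∨ ∃ u ∈ d, pvReach bombs u x) ∧
    (∀ u ∈ pvA_dfs (pvA_graph bombs) fuel d visited,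
        ∀ v ∈ pvNbr bombs u, v ∈ pvA_dfs (pvA_graph bombs) fuel d visited) := by
  intro fuel
  induction fuel with
  | zero =>
    intro d visited hnd hlt hcl hfuel
    -- fuel exhausted: the invariants force d = []
    have hlen : visited.length + d.length ≤ bombs.length := by
      have := pvNodup_length_le _ _ hnd hlt
      simpa [List.length_append] using this
    have hd : d = [] := List.length_eq_zero_iff.mp (by omega)
    subst hd
    simp only [pvA_dfs, List.append_nil] at *
    exact ⟨hnd, fun x hx => hx, fun x hx => Or.inl hx,
      fun u hu v hv => (hcl u hu v hv).elim id (fun h => absurd h (by simp))⟩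
  | succ fuel ih =>
    intro d visited hnd hlt hcl hfuel
    cases d with
    | nil =>
      simp only [pvA_dfs, List.append_nil] at *
      exact ⟨hnd, fun x hx => hx, fun x hx => Or.inl hx,
        fun u hu v hv => (hcl u hu v hv).elim id (fun h => absurd h (by simp))⟩
    | cons v0 rest =>
      simp only [pvA_dfs]
      set visited' := visited ++ [v0] with hv'
      have hi_lt : v0 < bombs.length := hlt v0 (by simp)
      have hrow : (pvA_graph bombs).getD v0 [] = pvNbr bombs v0 := by
        rw [pvA_graph_getD]; simp [hi_lt]
      set d' := ((pvA_graph bombs).getD v0 []).foldl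
        (fun acc j => if !visited'.contains j && !acc.contains j then acc ++ [j] else acc) rest with hd'
      have hmem_d' : ∀ x, x ∈ d' ↔ x ∈ rest ∨ (x ∈ pvNbr bombs v0 ∧ x ∉ visited') := by
        intro x; rw [hd', hrow]; exact pvA_fold_mem visited' (pvNbr bombs v0) rest x
      have hnd' : (visited' ++ d').Nodup := by
        rw [hd', hrow]
        apply pvA_fold_nodup
        have heq : visited ++ v0 :: rest = (visited ++ [v0]) ++ rest := by simp
        rw [hv']
        rwa [heq] at hnd
      have hlt' : ∀ x ∈ visited' ++ d', x < bombs.length := by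
        intro x hx
        rcases List.mem_append.mp hx with h1 | h1
        · rcases List.mem_append.mp h1 with h2 | h2
          · exact hlt x (by simp [h2])
          · simp only [List.mem_singleton] at h2; subst h2; exact hi_lt
        · rcases (hmem_d' x).mp h1 with h2 | ⟨h2, _⟩
          · exact hlt x (by simp [h2])
          · exact pvNbr_lt _ _ _ h2
      have hcl' : ∀ u ∈ visited', ∀ v ∈ pvNbr bombs u, v ∈ visited' ∨ v ∈ d' := by
        intro u hu v hv
        rcases List.mem_append.mp hu with h1 | h1
        · rcases hcl u h1 v hv with h2 | h2
          · exact Or.inl (by rw [hv']; simp [h2])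
          · rcases List.mem_cons.mp h2 with rfl | h2
            · exact Or.inl (by rw [hv']; simp)
            · exact Or.inr ((hmem_d' v).mpr (Or.inl h2))
        · simp only [List.mem_singleton] at h1; subst h1
          by_cases hvv : v ∈ visited'
          · exact Or.inl hvv
          · exact Or.inr ((hmem_d' v).mpr (Or.inr ⟨hv, hvv⟩))
      have hfuel' : bombs.length ≤ fuel + visited'.length := by
        rw [hv']; simp only [List.length_append, List.length_singleton]; omega
      obtain ⟨c1, c2, c3, c4⟩ := ih d' visited' hnd' hlt' hcl' hfuel'
      refine ⟨c1, ?_, ?_, c4⟩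
      · intro x hx
        rcases List.mem_append.mp hx with h1 | h1
        · exact c2 x (by simp [hv', h1])
        · rcases List.mem_cons.mp h1 with rfl | h1
          · exact c2 x (by simp [hv'])
          · exact c2 x (List.mem_append.mpr (Or.inr ((hmem_d' x).mpr (Or.inl h1))))
      · intro x hx
        rcases c3 x hx with h1 | ⟨u, hu, hr⟩
        · rcases List.mem_append.mp h1 with h2 | h2
          · exact Or.inl h2
          · simp only [List.mem_singleton] at h2
            refine Or.inr ⟨v0, by simp, ?_⟩
            rw [h2]
            exact Relation.ReflTransGen.refl
        · rcases (hmem_d' u).mp hu with h2 | ⟨h2, _⟩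
          · exact Or.inr ⟨u, by simp [h2], hr⟩
          · exact Or.inr ⟨v0, by simp, Relation.ReflTransGen.head h2 hr⟩

-- characterization of B's inner push fold
lemma pvB_fold_spec (l : List Nat) (st : List Nat) (vis : PySem.Set Nat) :
    (∀ x, x ∈ (l.foldl (fun (p : List Nat × PySem.Set Nat) v =>
        if PySem.Set.contains p.2 v then p else (v :: p.1, PySem.Set.add p.2 v)) (st, vis)).2
        ↔ x ∈ vis ∨ x ∈ l) ∧
    (∀ x, x ∈ (l.foldl (fun (p : List Nat × PySem.Set Nat) v =>
        if PySem.Set.contains p.2 v then p else (v :: p.1, PySem.Set.add p.2 v)) (st, vis)).1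
        ↔ x ∈ st ∨ (x ∈ l ∧ x ∉ vis)) ∧
    (vis.Nodup →
      (l.foldl (fun (p : List Nat × PySem.Set Nat) v =>
        if PySem.Set.contains p.2 v then p else (v :: p.1, PySem.Set.add p.2 v)) (st, vis)).2.Nodup) ∧
    ((l.foldl (fun (p : List Nat × PySem.Set Nat) v =>
        if PySem.Set.contains p.2 v then p else (v :: p.1, PySem.Set.add p.2 v)) (st, vis)).1.length
      + vis.length
      = st.length
      + (l.foldl (fun (p : List Nat × PySem.Set Nat) v =>
        if PySem.Set.contains p.2 v then p else (v :: p.1, PySem.Set.add p.2 v)) (st, vis)).2.length) := by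
  induction l generalizing st vis with
  | nil => simp
  | cons v t ih =>
    simp only [List.foldl_cons]
    by_cases hc : v ∈ vis
    · rw [if_pos (by simp [PySem.Set.contains, hc])]
      obtain ⟨i1, i2, i3, i4⟩ := ih st vis
      refine ⟨?_, ?_, i3, i4⟩
      · intro x
        rw [i1 x]
        rcases eq_or_ne x v with rfl | hne
        · simp [hc]
        · simp [List.mem_cons, hne]
      · intro x
        rw [i2 x]
        rcases eq_or_ne x v with rfl | hne
        · simp [hc]
        · simp [List.mem_cons, hne]
    · rw [if_neg (by simpa using hc)]
      have hadd : PySem.Set.add vis v = vis ++ [v] := by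
        simp [PySem.Set.add, hc]
      obtain ⟨i1, i2, i3, i4⟩ := ih (v :: st) (PySem.Set.add vis v)
      refine ⟨?_, ?_, ?_, ?_⟩
      · intro x
        rw [i1 x, hadd]
        simp only [List.mem_append, List.mem_cons]
        tauto
      · intro x
        rw [i2 x, hadd]
        simp only [List.mem_cons, List.mem_append]
        rcases eq_or_ne x v with rfl | hne
        · simp [hc]
        · simp [hne]
      · intro hnd
        apply i3
        rw [hadd]
        apply List.Nodup.append hnd (List.nodup_singleton v)
        intro a hamem hj
        simp only [List.mem_singleton] at hj
        subst hj
        exact hc hamem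
      · have hlen : (PySem.Set.add vis v).length = vis.length + 1 := by
          rw [hadd]; simp
        simp only [List.length_cons] at i4
        omega

-- main invariant lemma for B's stack loop
lemma pvB_dfs_spec (bombs : List (List Int)) (src : Nat) :
    ∀ (fuel : Nat) (stack : List Nat) (vis : PySem.Set Nat),
    vis.Nodup →
    (∀ x ∈ stack, x ∈ vis) →
    (∀ x ∈ vis, x < bombs.length) →
    (∀ x ∈ vis, pvReach bombs src x) →
    (∀ u ∈ vis, u ∉ stack → ∀ v ∈ pvNbr bombs u, v ∈ vis) →
    bombs.length + stack.length ≤ fuel + vis.length →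
    (pvB_dfs (pvB_adj bombs) fuel stack vis).Nodup ∧
    (∀ x ∈ vis, x ∈ pvB_dfs (pvB_adj bombs) fuel stack vis) ∧
    (∀ x ∈ pvB_dfs (pvB_adj bombs) fuel stack vis, pvReach bombs src x) ∧
    (∀ u ∈ pvB_dfs (pvB_adj bombs) fuel stack vis,
        ∀ v ∈ pvNbr bombs u, v ∈ pvB_dfs (pvB_adj bombs) fuel stack vis) := by
  intro fuel
  induction fuel with
  | zero =>
    intro stack vis hnd hsub hlt hreach hcl hfuel
    have hvlen : vis.length ≤ bombs.length := pvNodup_length_le _ _ hnd hlt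
    have hstack : stack = [] := List.length_eq_zero_iff.mp (by omega)
    subst hstack
    simp only [pvB_dfs]
    exact ⟨hnd, fun x hx => hx, hreach, fun u hu v hv => hcl u hu (by simp) v hv⟩
  | succ fuel ih =>
    intro stack vis hnd hsub hlt hreach hcl hfuel
    cases stack with
    | nil =>
      simp only [pvB_dfs]
      exact ⟨hnd, fun x hx => hx, hreach, fun u hu v hv => hcl u hu (by simp) v hv⟩
    | cons u rest =>
      simp only [pvB_dfs]
      have hu_vis : u ∈ vis := hsub u (by simp)
      have hu_lt : u < bombs.length := hlt u hu_vis
      have hrow : (pvB_adj bombs).getD u [] = pvNbr bombs u := by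
        rw [pvB_adj_getD]; simp [hu_lt]
      rw [hrow]
      obtain ⟨m2, m1, mnd, mlen⟩ := pvB_fold_spec (pvNbr bombs u) rest vis
      generalize hsEq : (pvNbr bombs u).foldl (fun (p : List Nat × PySem.Set Nat) v =>
          if PySem.Set.contains p.2 v then p
          else (v :: p.1, PySem.Set.add p.2 v)) (rest, vis) = s at m2 m1 mnd mlen ⊢
      have hsub' : ∀ x ∈ s.1, x ∈ s.2 := by
        intro x hx
        rcases (m1 x).mp hx with h | ⟨h, _⟩
        · exact (m2 x).mpr (Or.inl (hsub x (by simp [h])))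
        · exact (m2 x).mpr (Or.inr h)
      have hlt' : ∀ x ∈ s.2, x < bombs.length := by
        intro x hx
        rcases (m2 x).mp hx with h | h
        · exact hlt x h
        · exact pvNbr_lt _ _ _ h
      have hreach' : ∀ x ∈ s.2, pvReach bombs src x := by
        intro x hx
        rcases (m2 x).mp hx with h | h
        · exact hreach x h
        · exact Relation.ReflTransGen.tail (hreach u hu_vis) h
      have hcl' : ∀ w ∈ s.2, w ∉ s.1 → ∀ v ∈ pvNbr bombs w, v ∈ s.2 := by
        intro w hw hwn v hv
        by_cases hwu : w = u
        · subst hwu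
          exact (m2 v).mpr (Or.inr hv)
        · have hw_old : w ∈ vis := by
            by_cases hvw : w ∈ vis
            · exact hvw
            · exfalso
              rcases (m2 w).mp hw with h | h
              · exact hvw h
              · exact hwn ((m1 w).mpr (Or.inr ⟨h, hvw⟩))
          have hw_notrest : w ∉ rest := fun hin => hwn ((m1 w).mpr (Or.inl hin))
          have hnotstack : w ∉ (u :: rest) := by simp [hwu, hw_notrest]
          exact (m2 v).mpr (Or.inl (hcl w hw_old hnotstack v hv))
      have hfuel' : bombs.length + s.1.length ≤ fuel + s.2.length := by
        have hvlen : List.length vis ≤ bombs.length := pvNodup_length_le _ _ hnd hlt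
        simp only [List.length_cons] at hfuel
        omega
      obtain ⟨c1, c2, c3, c4⟩ := ih s.1 s.2 (mnd hnd) hsub' hlt' hreach' hcl' hfuel'
      exact ⟨c1, fun x hx => c2 x ((m2 x).mpr (Or.inl hx)), c3, c4⟩

-- a set closed under pvNbr that contains src contains everything reachable from src
lemma pvReach_mem_of_closed (bombs : List (List Int)) (F : List Nat)
    (hF : ∀ u ∈ F, ∀ v ∈ pvNbr bombs u, v ∈ F)
    (i x : Nat) (hi : i ∈ F) (hr : pvReach bombs i x) : x ∈ F := by
  induction hr with
  | refl => exact hi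
  | tail _ h2 ih => exact hF _ ih _ h2

-- per-source counts agree
lemma pvCount_eq (bombs : List (List Int)) (i : Nat) (hi : i < bombs.length) :
    (pvA_dfs (pvA_graph bombs) bombs.length [i] []).length
      = (pvB_dfs (pvB_adj bombs) bombs.length [i] (PySem.Set.ofList [i])).length := by
  obtain ⟨a_nd, a_sub, a_sound, a_cl⟩ :=
    pvA_dfs_spec bombs bombs.length [i] []
      (by simp) (by simpa using hi) (by simp) (by simp)
  have hof : PySem.Set.ofList [i] = ([i] : List Nat) := by
    simp [PySem.Set.ofList, PySem.Set.add, PySem.Set.contains]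
  obtain ⟨b_nd, b_sub, b_sound, b_cl⟩ :=
    pvB_dfs_spec bombs i bombs.length [i] (PySem.Set.ofList [i])
      (by rw [hof]; simp)
      (by simp [hof])
      (by rw [hof]; intro x hx; simp only [List.mem_singleton] at hx; subst hx; exact hi)
      (by rw [hof]; intro x hx; simp only [List.mem_singleton] at hx; subst hx
          exact Relation.ReflTransGen.refl)
      (by rw [hof]; intro u hu hun; exact absurd hu hun)
      (by rw [hof])
  have hAmem : ∀ x, x ∈ pvA_dfs (pvA_graph bombs) bombs.length [i] [] ↔ pvReach bombs i x := by
    intro x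
    constructor
    · intro hx
      rcases a_sound x hx with h | ⟨u, hu, hr⟩
      · exact absurd h (by simp)
      · simp only [List.mem_singleton] at hu; subst hu; exact hr
    · intro hr
      exact pvReach_mem_of_closed bombs _ a_cl i x (a_sub i (by simp)) hr
  have hBmem : ∀ x, x ∈ pvB_dfs (pvB_adj bombs) bombs.length [i] (PySem.Set.ofList [i])
      ↔ pvReach bombs i x := by
    intro x
    constructor
    · exact b_sound x
    · intro hr
      exact pvReach_mem_of_closed bombs _ b_cl i x (b_sub i (by rw [hof]; simp)) hr
  have hfs : (pvA_dfs (pvA_graph bombs) bombs.length [i] []).toFinset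
      = (pvB_dfs (pvB_adj bombs) bombs.length [i] (PySem.Set.ofList [i])).toFinset := by
    apply Finset.ext
    intro x
    simp only [List.mem_toFinset]
    rw [hAmem, hBmem]
  rw [← List.toFinset_card_of_nodup a_nd, ← List.toFinset_card_of_nodup b_nd, hfs]

-- running max over the counts
lemma pvFoldl_max_eq (l : List Int) (h : ∀ x ∈ l, 0 ≤ x) :
    l.foldl (fun res x => max res x) 0 = (PySem.List.max? l (fun x => x)).getD 0 := by
  cases l with
  | nil => rfl
  | cons x t =>
    rw [PySem.List.max?_id_cons]
    simp only [List.foldl_cons, Option.getD_some]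
    have hx : max 0 x = x := by
      have := h x (by simp)
      omega
    rw [hx]

-- ===== VERDICT (by name: the statement is the Claim_ definition above) =====
theorem maximumDetonation_spec : Claim_equal_maximumDetonation := by
  intro bombs _ _
  unfold Spec_maximumDetonation
  simp only [maximumDetonation, maximumDetonation_alt]
  rw [← List.foldl_map (f := fun i => ((pvA_dfs (pvA_graph bombs) bombs.length [i] []).length : Int))
        (g := fun res x => max res x)]
  have hmap : (List.range bombs.length).map
      (fun i => ((pvA_dfs (pvA_graph bombs) bombs.length [i] []).length : Int))
      = (List.range bombs.length).map
      (fun i => ((pvB_dfs (pvB_adj bombs) bombs.length [i] (PySem.Set.ofList [i])).length : Int)) := by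
    apply List.map_congr_left
    intro i hi
    have := pvCount_eq bombs i (List.mem_range.mp hi)
    exact_mod_cast congrArg (fun n : Nat => (n : Int)) this
  rw [hmap]
  apply pvFoldl_max_eq
  intro x hx
  rcases List.mem_map.mp hx with ⟨i, _, rfl⟩
  exact Int.natCast_nonneg _
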